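-- pv_equiv track=rewrite | github.com/max7969/adventofcode2024 | day12/day12.py | extend_region
-- ===== SOURCE A (Python) =====
-- neighbours = [(0, 1), (0, -1), (1, 0), (-1, 0)]
--
-- squares = [(0, 0), (0, 1), (1, 1), (1, 0) ,(0, 2), (1, 2), (2, 2), (2, 1), (2, 0)]
--
-- diagonals = [(1, 1), (1, -1), (-1, 1), (-1, -1)]
--
-- small_square = [(0,0), (0,1), (1,1), (1,0)]
--
-- def compute_sides(borders):
--     sides = 0
--     min_x, max_x = min([border[0] for border in borders]), max([border[0] for border in borders])
--     min_y, max_y = min([border[1] for border in borders]), max([border[1] for border in borders])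
--
--     for i in range(min_x - 1, max_x + 2):
--         for j in range(min_y - 1, max_y + 2):
--             count_borders = 0
--             for square in small_square:
--                 if (i + square[0], j + square[1]) in borders:
--                     count_borders += 1
--             if count_borders == 3:
--                 sides += 1
--     return sides
--
-- def extend_region(region, borders):
--     min_x, max_x = min([element[0] for element in region]), max([element[0] for element in region])
--     min_y, max_y = min([element[1] for element in region]), max([element[1] for element in region])
--     new_region = []
--     for i in range(min_x, max_x + 1):
--         for j in range(min_y, max_y + 1):
--             if (i, j) in region:
--                 for square in squares:
--                     new_region.append((i * 3 + square[0], j * 3 + square[1]))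
--     new_borders = []
--     for element in new_region:
--         for neighbour in neighbours:
--             if (element[0] + neighbour[0], element[1] + neighbour[1]) not in new_region:
--                 new_borders.append((element[0] + neighbour[0], element[1] + neighbour[1]))
--
--     for element in new_region:
--         for diagonal in diagonals:
--             if (element[0] + diagonal[0], element[1] + diagonal[1]) not in new_borders and (element[0] + diagonal[0], element[1] + diagonal[1]) not in new_region:
--                 new_borders.append((element[0] + diagonal[0], element[1] + diagonal[1]))
--
--     return compute_sides(new_borders)
-- ===== SOURCE B (Python) =====
-- def extend_region(region, borders):
--     # triple every cell into a 3x3 block of cells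
--     cells = {(3 * x + dx, 3 * y + dy)
--              for (x, y) in region for dx in range(3) for dy in range(3)}
--     # shell: every cell 8-adjacent to the tripled region but not inside it
--     shell = {(x + dx, y + dy)
--              for (x, y) in cells for dx in (-1, 0, 1) for dy in (-1, 0, 1)} - cells
--     # a 2x2 window can contain 3 shell cells only if it touches the shell
--     candidates = {(x - dx, y - dy)
--                   for (x, y) in shell for dx in (0, 1) for dy in (0, 1)}
--     return sum(1 for (i, j) in candidates
--                if sum((i + dx, j + dy) in shell for dx in (0, 1) for dy in (0, 1)) == 3)
-- ===== Notes on version B (the rewrite author's own statement) =====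
-- stated objective: faster
-- what changed: B drops A's three quadratic passes (bounding-box scan with list membership to build the tripled region, two ordered append loops with list membership to build the border list, and a full border-bounding-box window scan) and instead builds the tripled cells and their Moore-neighbourhood shell as set comprehensions, then tests only the 2x2 windows that touch a shell cell.
import Mathlib
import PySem

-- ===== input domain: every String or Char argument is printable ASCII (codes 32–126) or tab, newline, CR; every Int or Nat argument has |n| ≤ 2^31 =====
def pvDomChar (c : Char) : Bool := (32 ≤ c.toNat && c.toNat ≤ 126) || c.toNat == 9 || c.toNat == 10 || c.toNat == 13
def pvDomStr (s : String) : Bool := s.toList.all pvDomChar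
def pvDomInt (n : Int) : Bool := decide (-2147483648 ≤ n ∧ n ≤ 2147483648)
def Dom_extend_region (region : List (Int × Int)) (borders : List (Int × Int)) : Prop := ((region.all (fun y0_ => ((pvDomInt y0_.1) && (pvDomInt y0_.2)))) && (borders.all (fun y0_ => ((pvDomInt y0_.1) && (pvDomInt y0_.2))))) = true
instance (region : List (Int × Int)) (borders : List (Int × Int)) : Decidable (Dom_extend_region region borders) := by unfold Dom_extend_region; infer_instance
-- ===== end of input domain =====

-- ===== PORT A =====
-- B replaces A's bounding-box/list scans by set comprehensions (tripled cells, Moore shell,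
-- shell-derived candidate windows); objective: faster. Pre_ excludes the empty region, where
-- Python A raises ValueError (min() of an empty sequence).
def pvNeighbours : List (Int × Int) := [(0, 1), (0, -1), (1, 0), (-1, 0)]

def pvSquares : List (Int × Int) := [(0, 0), (0, 1), (1, 1), (1, 0), (0, 2), (1, 2), (2, 2), (2, 1), (2, 0)]

def pvDiagonals : List (Int × Int) := [(1, 1), (1, -1), (-1, 1), (-1, -1)]

def pvSmallSquare : List (Int × Int) := [(0, 0), (0, 1), (1, 1), (1, 0)]

def compute_sides (borders : List (Int × Int)) : Int :=
  match PySem.List.min? (borders.map (fun b => b.1)) (fun x => x),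
        PySem.List.max? (borders.map (fun b => b.1)) (fun x => x),
        PySem.List.min? (borders.map (fun b => b.2)) (fun x => x),
        PySem.List.max? (borders.map (fun b => b.2)) (fun x => x) with
  | some min_x, some max_x, some min_y, some max_y =>
      (PySem.List.pyRange (min_x - 1) (max_x + 2) 1).foldl (fun sides i =>
        (PySem.List.pyRange (min_y - 1) (max_y + 2) 1).foldl (fun sides j =>
          if pvSmallSquare.foldl (fun c s => if (i + s.1, j + s.2) ∈ borders then c + 1 else c) (0 : Int) = 3
          then sides + 1 else sides) sides) 0
  | _, _, _, _ => 0    -- unreachable under Pre_: Python raises ValueError on an empty list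

def extend_region (region : List (Int × Int)) (borders : List (Int × Int)) : Int :=
  match PySem.List.min? (region.map (fun e => e.1)) (fun x => x),
        PySem.List.max? (region.map (fun e => e.1)) (fun x => x),
        PySem.List.min? (region.map (fun e => e.2)) (fun x => x),
        PySem.List.max? (region.map (fun e => e.2)) (fun x => x) with
  | some min_x, some max_x, some min_y, some max_y =>
      let new_region :=
        (PySem.List.pyRange min_x (max_x + 1) 1).foldl (fun acc i =>
          (PySem.List.pyRange min_y (max_y + 1) 1).foldl (fun acc j =>
            if (i, j) ∈ region then
              pvSquares.foldl (fun acc s => acc ++ [(i * 3 + s.1, j * 3 + s.2)]) acc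
            else acc) acc) []
      let nb1 :=
        new_region.foldl (fun nb e =>
          pvNeighbours.foldl (fun nb n =>
            if (e.1 + n.1, e.2 + n.2) ∈ new_region then nb
            else nb ++ [(e.1 + n.1, e.2 + n.2)]) nb) []
      let nb2 :=
        new_region.foldl (fun nb e =>
          pvDiagonals.foldl (fun nb d =>
            if (e.1 + d.1, e.2 + d.2) ∉ nb ∧ (e.1 + d.1, e.2 + d.2) ∉ new_region then
              nb ++ [(e.1 + d.1, e.2 + d.2)]
            else nb) nb) nb1
      compute_sides nb2
  | _, _, _, _ => 0    -- unreachable under Pre_: Python raises ValueError on an empty list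

-- ===== PORT B =====
def pvThree : List Int := [0, 1, 2]

def pvPm1 : List Int := [-1, 0, 1]

def pvZO : List Int := [0, 1]

-- generator of: {(3x+dx, 3y+dy) for (x,y) in region for dx in range(3) for dy in range(3)}
def pvCellsL (region : List (Int × Int)) : List (Int × Int) :=
  region.flatMap (fun c => pvThree.flatMap (fun dx => pvThree.map (fun dy => (3 * c.1 + dx, 3 * c.2 + dy))))

def pvCells (region : List (Int × Int)) : PySem.Set (Int × Int) := PySem.Set.ofList (pvCellsL region)

-- generator of: {(x+dx, y+dy) for (x,y) in cells for dx in (-1,0,1) for dy in (-1,0,1)}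
def pvMooreL (cells : List (Int × Int)) : List (Int × Int) :=
  cells.flatMap (fun c => pvPm1.flatMap (fun dx => pvPm1.map (fun dy => (c.1 + dx, c.2 + dy))))

def pvShell (region : List (Int × Int)) : PySem.Set (Int × Int) :=
  PySem.Set.diff (PySem.Set.ofList (pvMooreL (pvCells region))) (pvCells region)

-- generator of: {(x-dx, y-dy) for (x,y) in shell for dx in (0,1) for dy in (0,1)}
def pvCandL (shell : List (Int × Int)) : List (Int × Int) :=
  shell.flatMap (fun c => pvZO.flatMap (fun dx => pvZO.map (fun dy => (c.1 - dx, c.2 - dy))))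

def pvCand (region : List (Int × Int)) : PySem.Set (Int × Int) := PySem.Set.ofList (pvCandL (pvShell region))

def extend_region_alt (region : List (Int × Int)) (borders : List (Int × Int)) : Int :=
  List.foldl (fun acc p =>
      acc + (if pvZO.foldl (fun c dx => pvZO.foldl (fun c dy =>
                 c + (if (p.1 + dx, p.2 + dy) ∈ (pvShell region : List (Int × Int)) then (1 : Int) else 0)) c) 0 = 3
             then (1 : Int) else 0))
    0 (pvCand region)

-- ===== PRECONDITION & SPEC =====
-- Pre_ excludes exactly the empty region, on which Python's min() raises ValueError.
def Pre_extend_region (region : List (Int × Int)) (borders : List (Int × Int)) : Prop := region ≠ []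
instance (region : List (Int × Int)) (borders : List (Int × Int)) : Decidable (Pre_extend_region region borders) := by unfold Pre_extend_region; infer_instance

def pvWitness_extend_region : (List (Int × Int)) × (List (Int × Int)) := ([(0, 0)], [])

def Spec_extend_region (region : List (Int × Int)) (borders : List (Int × Int)) (out : Int) : Prop := out = extend_region_alt region borders
instance (region : List (Int × Int)) (borders : List (Int × Int)) (out : Int) : Decidable (Spec_extend_region region borders out) := by unfold Spec_extend_region; infer_instance

-- ===== CLAIM (what is proved, stated in full; the proofs are below) =====
def Claim_equal_extend_region : Prop := ∀ (region : List (Int × Int)) (borders : List (Int × Int)), Dom_extend_region region borders → Pre_extend_region region borders → Spec_extend_region region borders (extend_region region borders)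

-- ===== LEMMAS AND PROOFS =====

def pvGood (sh : List (Int × Int)) (p : Int × Int) : Bool :=
  pvSmallSquare.countP (fun s => decide ((p.1 + s.1, p.2 + s.2) ∈ sh)) == 3

-- squares is exactly {0,1,2} x {0,1,2}, small_square is {0,1} x {0,1}
theorem pv_squares_sub : ∀ s ∈ pvSquares, s.1 ∈ pvThree ∧ s.2 ∈ pvThree := by decide

theorem pv_squares_sup : ∀ dx ∈ pvThree, ∀ dy ∈ pvThree, (dx, dy) ∈ pvSquares := by decide

theorem pv_smallsquare_sub : ∀ s ∈ pvSmallSquare, s.1 ∈ pvZO ∧ s.2 ∈ pvZO := by decide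

theorem pv_dirs_cover : ∀ dx ∈ pvPm1, ∀ dy ∈ pvPm1, ¬(dx = 0 ∧ dy = 0) →
    ((dx, dy) ∈ pvNeighbours ∨ (dx, dy) ∈ pvDiagonals) := by decide

theorem pv_neigh_pm1 : ∀ d ∈ pvNeighbours, d.1 ∈ pvPm1 ∧ d.2 ∈ pvPm1 := by decide

theorem pv_diag_pm1 : ∀ d ∈ pvDiagonals, d.1 ∈ pvPm1 ∧ d.2 ∈ pvPm1 := by decide

theorem pv_mem_dirfold1 (dirs NR : List (Int × Int)) (e : Int × Int) (nb0 : List (Int × Int)) (p : Int × Int) :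
    p ∈ dirs.foldl (fun nb n => if (e.1 + n.1, e.2 + n.2) ∈ NR then nb else nb ++ [(e.1 + n.1, e.2 + n.2)]) nb0
      ↔ p ∈ nb0 ∨ ∃ n ∈ dirs, p = (e.1 + n.1, e.2 + n.2) ∧ p ∉ NR := by
  induction dirs generalizing nb0 with
  | nil => simp
  | cons d t ih =>
    by_cases hc : (e.1 + d.1, e.2 + d.2) ∈ NR
    · simp only [List.foldl_cons, if_pos hc, ih, List.mem_cons]
      constructor
      · rintro (hh | ⟨n, hn, rfl, hmem⟩)
        · exact Or.inl hh
        · exact Or.inr ⟨n, Or.inr hn, rfl, hmem⟩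
      · rintro (hh | ⟨n, hn | hn, rfl, hmem⟩)
        · exact Or.inl hh
        · subst hn; exact absurd hc hmem
        · exact Or.inr ⟨n, hn, rfl, hmem⟩
    · simp only [List.foldl_cons, if_neg hc, ih, List.mem_cons]
      constructor
      · rintro (hh | ⟨n, hn, rfl, hmem⟩)
        · rcases List.mem_append.mp hh with hh | hh
          · exact Or.inl hh
          · have := List.mem_singleton.mp hh
            exact Or.inr ⟨d, Or.inl rfl, this, this ▸ hc⟩
        · exact Or.inr ⟨n, Or.inr hn, rfl, hmem⟩
      · rintro (hh | ⟨n, hn | hn, rfl, hmem⟩)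
        · exact Or.inl (List.mem_append_left _ hh)
        · subst hn; exact Or.inl (List.mem_append_right _ (List.mem_singleton.mpr rfl))
        · exact Or.inr ⟨n, hn, rfl, hmem⟩


theorem pv_mem_dirfold2 (dirs NR : List (Int × Int)) (e : Int × Int) (nb0 : List (Int × Int)) (p : Int × Int) :
    p ∈ dirs.foldl (fun nb d =>
        if (e.1 + d.1, e.2 + d.2) ∉ nb ∧ (e.1 + d.1, e.2 + d.2) ∉ NR then nb ++ [(e.1 + d.1, e.2 + d.2)] else nb) nb0
      ↔ p ∈ nb0 ∨ ∃ d ∈ dirs, p = (e.1 + d.1, e.2 + d.2) ∧ p ∉ NR := by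
  induction dirs generalizing nb0 with
  | nil => simp
  | cons d t ih =>
    by_cases hc : (e.1 + d.1, e.2 + d.2) ∉ nb0 ∧ (e.1 + d.1, e.2 + d.2) ∉ NR
    · simp only [List.foldl_cons, if_pos hc, ih, List.mem_cons]
      constructor
      · rintro (hh | ⟨n, hn, rfl, hmem⟩)
        · rcases List.mem_append.mp hh with hh | hh
          · exact Or.inl hh
          · have := List.mem_singleton.mp hh
            exact Or.inr ⟨d, Or.inl rfl, this, this ▸ hc.2⟩
        · exact Or.inr ⟨n, Or.inr hn, rfl, hmem⟩
      · rintro (hh | ⟨n, hn | hn, rfl, hmem⟩)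
        · exact Or.inl (List.mem_append_left _ hh)
        · subst hn; exact Or.inl (List.mem_append_right _ (List.mem_singleton.mpr rfl))
        · exact Or.inr ⟨n, hn, rfl, hmem⟩
    · simp only [List.foldl_cons, if_neg hc, ih, List.mem_cons]
      rw [Classical.not_and_iff_not_or_not, Classical.not_not] at hc
      constructor
      · rintro (hh | ⟨n, hn, rfl, hmem⟩)
        · exact Or.inl hh
        · exact Or.inr ⟨n, Or.inr hn, rfl, hmem⟩
      · rintro (hh | ⟨n, hn | hn, rfl, hmem⟩)
        · exact Or.inl hh
        · subst hn
          rcases hc with hc | hc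
          · exact Or.inl hc
          · exact absurd hmem hc
        · exact Or.inr ⟨n, hn, rfl, hmem⟩

theorem pv_mem_nbloop1 (l NR : List (Int × Int)) (nb0 : List (Int × Int)) (p : Int × Int) :
    p ∈ l.foldl (fun nb e =>
        pvNeighbours.foldl (fun nb n => if (e.1 + n.1, e.2 + n.2) ∈ NR then nb else nb ++ [(e.1 + n.1, e.2 + n.2)]) nb) nb0
      ↔ p ∈ nb0 ∨ ∃ e ∈ l, ∃ n ∈ pvNeighbours, p = (e.1 + n.1, e.2 + n.2) ∧ p ∉ NR := by
  induction l generalizing nb0 with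
  | nil => simp
  | cons e t ih =>
    rw [List.foldl_cons, ih, pv_mem_dirfold1]
    constructor
    · rintro ((hh | ⟨n, hn, hp, hmem⟩) | ⟨e', he', n, hn, hp, hmem⟩)
      · exact Or.inl hh
      · exact Or.inr ⟨e, by simp, n, hn, hp, hmem⟩
      · exact Or.inr ⟨e', List.mem_cons_of_mem _ he', n, hn, hp, hmem⟩
    · rintro (hh | ⟨e', he', n, hn, hp, hmem⟩)
      · exact Or.inl (Or.inl hh)
      · rcases List.mem_cons.mp he' with rfl | he'
        · exact Or.inl (Or.inr ⟨n, hn, hp, hmem⟩)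
        · exact Or.inr ⟨e', he', n, hn, hp, hmem⟩

theorem pv_mem_nbloop2 (l NR : List (Int × Int)) (nb0 : List (Int × Int)) (p : Int × Int) :
    p ∈ l.foldl (fun nb e =>
        pvDiagonals.foldl (fun nb d =>
          if (e.1 + d.1, e.2 + d.2) ∉ nb ∧ (e.1 + d.1, e.2 + d.2) ∉ NR then nb ++ [(e.1 + d.1, e.2 + d.2)] else nb) nb) nb0
      ↔ p ∈ nb0 ∨ ∃ e ∈ l, ∃ d ∈ pvDiagonals, p = (e.1 + d.1, e.2 + d.2) ∧ p ∉ NR := by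
  induction l generalizing nb0 with
  | nil => simp
  | cons e t ih =>
    rw [List.foldl_cons, ih, pv_mem_dirfold2]
    constructor
    · rintro ((hh | ⟨d, hd, hp, hmem⟩) | ⟨e', he', d, hd, hp, hmem⟩)
      · exact Or.inl hh
      · exact Or.inr ⟨e, by simp, d, hd, hp, hmem⟩
      · exact Or.inr ⟨e', List.mem_cons_of_mem _ he', d, hd, hp, hmem⟩
    · rintro (hh | ⟨e', he', d, hd, hp, hmem⟩)
      · exact Or.inl (Or.inl hh)
      · rcases List.mem_cons.mp he' with rfl | he'
        · exact Or.inl (Or.inr ⟨d, hd, hp, hmem⟩)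
        · exact Or.inr ⟨e', he', d, hd, hp, hmem⟩

theorem pv_mem_jfold (region : List (Int × Int)) (i : Int) (lj : List Int) (acc : List (Int × Int)) (p : Int × Int) :
    p ∈ lj.foldl (fun acc j =>
        if (i, j) ∈ region then pvSquares.foldl (fun acc s => acc ++ [(i * 3 + s.1, j * 3 + s.2)]) acc else acc) acc
      ↔ p ∈ acc ∨ ∃ j ∈ lj, (i, j) ∈ region ∧ ∃ s ∈ pvSquares, p = (i * 3 + s.1, j * 3 + s.2) := by
  induction lj generalizing acc with
  | nil => simp
  | cons j t ih =>
    by_cases hr : (i, j) ∈ region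
    · rw [List.foldl_cons, if_pos hr, PySem.List.foldl_append_singleton_eq_map, ih]
      constructor
      · rintro (hh | ⟨j', hj', hr', s, hs, hp⟩)
        · rcases List.mem_append.mp hh with hh | hh
          · exact Or.inl hh
          · rcases List.mem_map.mp hh with ⟨s, hs, hp⟩
            exact Or.inr ⟨j, by simp, hr, s, hs, hp.symm⟩
        · exact Or.inr ⟨j', List.mem_cons_of_mem _ hj', hr', s, hs, hp⟩
      · rintro (hh | ⟨j', hj', hr', s, hs, hp⟩)
        · exact Or.inl (List.mem_append_left _ hh)
        · rcases List.mem_cons.mp hj' with rfl | hj'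
          · exact Or.inl (List.mem_append_right _ (List.mem_map.mpr ⟨s, hs, hp.symm⟩))
          · exact Or.inr ⟨j', hj', hr', s, hs, hp⟩
    · rw [List.foldl_cons, if_neg hr, ih]
      constructor
      · rintro (hh | ⟨j', hj', hr', s, hs, hp⟩)
        · exact Or.inl hh
        · exact Or.inr ⟨j', List.mem_cons_of_mem _ hj', hr', s, hs, hp⟩
      · rintro (hh | ⟨j', hj', hr', s, hs, hp⟩)
        · exact Or.inl hh
        · rcases List.mem_cons.mp hj' with rfl | hj'
          · exact absurd hr' hr
          · exact Or.inr ⟨j', hj', hr', s, hs, hp⟩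

theorem pv_mem_nrloop (region : List (Int × Int)) (li lj : List Int) (acc : List (Int × Int)) (p : Int × Int) :
    p ∈ li.foldl (fun acc i =>
        lj.foldl (fun acc j =>
          if (i, j) ∈ region then pvSquares.foldl (fun acc s => acc ++ [(i * 3 + s.1, j * 3 + s.2)]) acc else acc) acc) acc
      ↔ p ∈ acc ∨ ∃ i ∈ li, ∃ j ∈ lj, (i, j) ∈ region ∧ ∃ s ∈ pvSquares, p = (i * 3 + s.1, j * 3 + s.2) := by
  induction li generalizing acc with
  | nil => simp
  | cons i t ih =>
    rw [List.foldl_cons, ih, pv_mem_jfold]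
    constructor
    · rintro ((hh | ⟨j, hj, hr, s, hs, hp⟩) | ⟨i', hi', rest⟩)
      · exact Or.inl hh
      · exact Or.inr ⟨i, by simp, j, hj, hr, s, hs, hp⟩
      · exact Or.inr ⟨i', List.mem_cons_of_mem _ hi', rest⟩
    · rintro (hh | ⟨i', hi', rest⟩)
      · exact Or.inl (Or.inl hh)
      · rcases List.mem_cons.mp hi' with rfl | hi'
        · exact Or.inl (Or.inr rest)
        · exact Or.inr ⟨i', hi', rest⟩

-- grid of pairs is nodup
theorem pv_grid_nodup (li lj : List Int) (h1 : li.Nodup) (h2 : lj.Nodup) :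
    (li.flatMap (fun i => lj.map (fun j => (i, j)))).Nodup := by
  induction li with
  | nil => simp
  | cons i t ih =>
    rcases List.nodup_cons.mp h1 with ⟨hi, ht⟩
    rw [List.flatMap_cons]
    apply List.Nodup.append
    · exact h2.map (fun a b hab => (Prod.mk.injEq _ _ _ _).mp hab |>.2)
    · exact ih ht
    · intro q hq hq'
      rcases List.mem_map.mp hq with ⟨j, hj, rfl⟩
      rcases List.mem_flatMap.mp hq' with ⟨i', hi', hq''⟩
      rcases List.mem_map.mp hq'' with ⟨j', hj', heq⟩
      rcases (Prod.mk.injEq _ _ _ _).mp heq with ⟨h1', _⟩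
      exact hi (h1' ▸ hi')

theorem pv_countP_eq (l1 l2 : List (Int × Int)) (P : Int × Int → Bool)
    (h1 : l1.Nodup) (h2 : l2.Nodup) (hm : ∀ p, P p = true → (p ∈ l1 ↔ p ∈ l2)) :
    l1.countP P = l2.countP P := by
  rw [List.countP_eq_length_filter, List.countP_eq_length_filter]
  apply List.Perm.length_eq
  rw [List.perm_ext_iff_of_nodup (h1.filter P) (h2.filter P)]
  intro a
  simp only [List.mem_filter]
  constructor
  · rintro ⟨ha, hp⟩; exact ⟨(hm a hp).mp ha, hp⟩
  · rintro ⟨ha, hp⟩; exact ⟨(hm a hp).mpr ha, hp⟩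

theorem pv_sum_countP (li lj : List Int) (P : Int × Int → Bool) :
    (li.map (fun i => ((lj.countP (fun j => P (i, j))) : Int))).sum
      = ((li.flatMap (fun i => lj.map (fun j => (i, j)))).countP P : Int) := by
  induction li with
  | nil => simp
  | cons i t ih =>
    simp [List.countP_append, List.countP_map, ih, Function.comp_def]
    try push_cast
    try ring
    try omega

-- B's inner window sum equals the pvGood test
theorem pv_window_eq (sh : List (Int × Int)) (p : Int × Int) :
    (pvZO.foldl (fun c dx => pvZO.foldl (fun c dy =>
        c + (if (p.1 + dx, p.2 + dy) ∈ sh then (1 : Int) else 0)) c) 0 = 3)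
      ↔ pvGood sh p = true := by
  by_cases h1 : p ∈ sh <;>
  by_cases h2 : (p.1, p.2 + 1) ∈ sh <;>
  by_cases h3 : (p.1 + 1, p.2) ∈ sh <;>
  by_cases h4 : (p.1 + 1, p.2 + 1) ∈ sh <;>
    simp [pvZO, pvGood, pvSmallSquare, h1, h2, h3, h4]

-- membership in B's cell list
theorem pv_mem_cellsL (region : List (Int × Int)) (p : Int × Int) :
    p ∈ pvCellsL region ↔ ∃ c ∈ region, ∃ dx ∈ pvThree, ∃ dy ∈ pvThree, p = (3 * c.1 + dx, 3 * c.2 + dy) := by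
  simp [pvCellsL, List.mem_flatMap, List.mem_map, eq_comm]

-- A's bounding-box scan produces exactly B's cell list (as a set)
theorem pv_NR_iff (region : List (Int × Int)) (mnx mxx mny mxy : Int)
    (hmnx : PySem.List.min? (region.map (fun e => e.1)) (fun x => x) = some mnx)
    (hmxx : PySem.List.max? (region.map (fun e => e.1)) (fun x => x) = some mxx)
    (hmny : PySem.List.min? (region.map (fun e => e.2)) (fun x => x) = some mny)
    (hmxy : PySem.List.max? (region.map (fun e => e.2)) (fun x => x) = some mxy)
    (p : Int × Int) :
    (∃ i ∈ PySem.List.pyRange mnx (mxx + 1) 1, ∃ j ∈ PySem.List.pyRange mny (mxy + 1) 1,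
        (i, j) ∈ region ∧ ∃ s ∈ pvSquares, p = (i * 3 + s.1, j * 3 + s.2))
      ↔ p ∈ pvCellsL region := by
  rw [pv_mem_cellsL]
  constructor
  · rintro ⟨i, hi, j, hj, hr, s, hs, rfl⟩
    exact ⟨(i, j), hr, s.1, (pv_squares_sub s hs).1, s.2, (pv_squares_sub s hs).2,
      by apply Prod.ext <;> simp <;> ring⟩
  · rintro ⟨c, hc, dx, hdx, dy, hdy, rfl⟩
    have h1 := PySem.List.min?_isMin hmnx c.1 (List.mem_map_of_mem hc)
    have h2 := PySem.List.max?_isMax hmxx c.1 (List.mem_map_of_mem hc)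
    have h3 := PySem.List.min?_isMin hmny c.2 (List.mem_map_of_mem hc)
    have h4 := PySem.List.max?_isMax hmxy c.2 (List.mem_map_of_mem hc)
    refine ⟨c.1, PySem.List.mem_pyRange_one.mpr ⟨h1, by omega⟩,
            c.2, PySem.List.mem_pyRange_one.mpr ⟨h3, by omega⟩, by simpa using hc,
            (dx, dy), pv_squares_sup dx hdx dy hdy, by apply Prod.ext <;> simp <;> ring⟩

-- the border list built by A's two loops has exactly the members of B's shell
theorem pv_border_iff (region NR : List (Int × Int))
    (hNR : ∀ q : Int × Int, q ∈ NR ↔ q ∈ pvCellsL region) (p : Int × Int) :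
    p ∈ NR.foldl (fun nb e =>
          pvDiagonals.foldl (fun nb d =>
            if (e.1 + d.1, e.2 + d.2) ∉ nb ∧ (e.1 + d.1, e.2 + d.2) ∉ NR then nb ++ [(e.1 + d.1, e.2 + d.2)] else nb) nb)
        (NR.foldl (fun nb e =>
          pvNeighbours.foldl (fun nb n => if (e.1 + n.1, e.2 + n.2) ∈ NR then nb else nb ++ [(e.1 + n.1, e.2 + n.2)]) nb) [])
      ↔ p ∈ (pvShell region : List (Int × Int)) := by
  rw [pv_mem_nbloop2, pv_mem_nbloop1]
  have hshell : p ∈ (pvShell region : List (Int × Int)) ↔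
      (∃ c ∈ pvCellsL region, ∃ dx ∈ pvPm1, ∃ dy ∈ pvPm1, p = (c.1 + dx, c.2 + dy)) ∧ p ∉ pvCellsL region := by
    unfold pvShell pvCells
    rw [PySem.Set.mem_diff, PySem.Set.mem_ofList, PySem.Set.mem_ofList]
    unfold pvMooreL
    simp only [List.mem_flatMap, List.mem_map, PySem.Set.mem_ofList]
    constructor
    · rintro ⟨⟨c, hc, hdxy⟩, hnot⟩
      rcases hdxy with ⟨dx, hdx, dy, hdy, rfl⟩
      exact ⟨⟨c, hc, dx, hdx, dy, hdy, rfl⟩, hnot⟩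
    · rintro ⟨⟨c, hc, dx, hdx, dy, hdy, rfl⟩, hnot⟩
      exact ⟨⟨c, hc, dx, hdx, dy, hdy, rfl⟩, hnot⟩
  rw [hshell]
  constructor
  · rintro ((h | ⟨e, he, n, hn, rfl, hnot⟩) | ⟨e, he, d, hd, rfl, hnot⟩)
    · exact absurd h (List.not_mem_nil)
    · exact ⟨⟨e, (hNR e).mp he, n.1, (pv_neigh_pm1 n hn).1, n.2, (pv_neigh_pm1 n hn).2, rfl⟩,
        fun hx => hnot ((hNR _).mpr hx)⟩
    · exact ⟨⟨e, (hNR e).mp he, d.1, (pv_diag_pm1 d hd).1, d.2, (pv_diag_pm1 d hd).2, rfl⟩,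
        fun hx => hnot ((hNR _).mpr hx)⟩
  · rintro ⟨⟨c, hc, dx, hdx, dy, hdy, rfl⟩, hnot⟩
    have hzz : ¬(dx = 0 ∧ dy = 0) := by
      rintro ⟨rfl, rfl⟩
      exact hnot (by simpa using hc)
    rcases pv_dirs_cover dx hdx dy hdy hzz with hmem | hmem
    · exact Or.inl (Or.inr ⟨c, (hNR c).mpr hc, (dx, dy), hmem, rfl, fun hx => hnot ((hNR _).mp hx)⟩)
    · exact Or.inr ⟨c, (hNR c).mpr hc, (dx, dy), hmem, rfl, fun hx => hnot ((hNR _).mp hx)⟩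


-- compute_sides as a window count over the bounding-box grid
theorem pv_compute_sides_eq (borders : List (Int × Int)) (mnx mxx mny mxy : Int)
    (h1 : PySem.List.min? (borders.map (fun b => b.1)) (fun x => x) = some mnx)
    (h2 : PySem.List.max? (borders.map (fun b => b.1)) (fun x => x) = some mxx)
    (h3 : PySem.List.min? (borders.map (fun b => b.2)) (fun x => x) = some mny)
    (h4 : PySem.List.max? (borders.map (fun b => b.2)) (fun x => x) = some mxy) :
    compute_sides borders
      = (((PySem.List.pyRange (mnx - 1) (mxx + 2) 1).flatMap (fun i =>
            (PySem.List.pyRange (mny - 1) (mxy + 2) 1).map (fun j => (i, j)))).countP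
          (fun q => pvGood borders q) : Int) := by
  unfold compute_sides
  rw [h1, h2, h3, h4]
  dsimp only
  have hinner : ∀ (sides i : Int),
      (PySem.List.pyRange (mny - 1) (mxy + 2) 1).foldl (fun sides j =>
        if pvSmallSquare.foldl (fun c s => if (i + s.1, j + s.2) ∈ borders then c + 1 else c) (0 : Int) = 3
        then sides + 1 else sides) sides
      = sides + ((PySem.List.pyRange (mny - 1) (mxy + 2) 1).countP (fun j => pvGood borders (i, j)) : Int) := by
    intro sides i
    rw [PySem.List.foldl_congr_mem _ _
      (fun sides j => if pvGood borders (i, j) = true then sides + 1 else sides) _ ?_]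
    · exact PySem.List.foldl_if_add_one _ _ _
    · intro acc j hj
      have hcond : (pvSmallSquare.foldl (fun c s => if (i + s.1, j + s.2) ∈ borders then c + 1 else c) (0 : Int) = 3)
          ↔ pvGood borders (i, j) = true := by
        rw [PySem.List.foldl_ite_add_one (fun s : Int × Int => (i + s.1, j + s.2) ∈ borders)]
        simp only [pvGood, beq_iff_eq]
        constructor <;> intro h <;> omega
      simp only [hcond]
  rw [PySem.List.foldl_congr_mem _ _
    (fun sides i => sides + ((PySem.List.pyRange (mny - 1) (mxy + 2) 1).countP (fun j => pvGood borders (i, j)) : Int)) _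
    (fun acc i _ => hinner acc i)]
  rw [PySem.List.foldl_add]
  rw [pv_sum_countP (P := fun q => pvGood borders q)]
  omega

-- B as a window count over the candidate positions
theorem pv_alt_eq (region borders : List (Int × Int)) :
    extend_region_alt region borders
      = (((pvCand region : List (Int × Int))).countP (fun q => pvGood (pvShell region) q) : Int) := by
  unfold extend_region_alt
  rw [PySem.List.foldl_add (pvCand region : List (Int × Int))
    (fun p => if pvZO.foldl (fun c dx => pvZO.foldl (fun c dy =>
        c + (if (p.1 + dx, p.2 + dy) ∈ (pvShell region : List (Int × Int)) then (1 : Int) else 0)) c) 0 = 3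
      then (1 : Int) else 0)]
  have hc : ∀ p : Int × Int,
      (if pvZO.foldl (fun c dx => pvZO.foldl (fun c dy =>
          c + (if (p.1 + dx, p.2 + dy) ∈ (pvShell region : List (Int × Int)) then (1 : Int) else 0)) c) 0 = 3
        then (1 : Int) else 0)
      = (if pvGood (pvShell region) p = true then (1 : Int) else 0) := fun p => by
    simp only [pv_window_eq]
  rw [List.map_congr_left (fun p _ => hc p),
    PySem.List.sum_map_ite_one_zero (fun q => pvGood (pvShell region) q)]
  omega

-- the final counting argument: any list with the shell's members, fed to compute_sides, counts B's corners
theorem pv_final (region borders NB : List (Int × Int))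
    (hSh : ∀ p : Int × Int, p ∈ NB ↔ p ∈ (pvShell region : List (Int × Int)))
    (hne : NB ≠ []) :
    compute_sides NB = extend_region_alt region borders := by
  rcases h1 : PySem.List.min? (NB.map (fun b => b.1)) (fun x => x) with _ | mnx
  · exact absurd (List.map_eq_nil_iff.mp ((PySem.List.min?_eq_none_iff _ _).mp h1)) hne
  rcases h2 : PySem.List.max? (NB.map (fun b => b.1)) (fun x => x) with _ | mxx
  · exact absurd (List.map_eq_nil_iff.mp ((PySem.List.max?_eq_none_iff _ _).mp h2)) hne
  rcases h3 : PySem.List.min? (NB.map (fun b => b.2)) (fun x => x) with _ | mny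
  · exact absurd (List.map_eq_nil_iff.mp ((PySem.List.min?_eq_none_iff _ _).mp h3)) hne
  rcases h4 : PySem.List.max? (NB.map (fun b => b.2)) (fun x => x) with _ | mxy
  · exact absurd (List.map_eq_nil_iff.mp ((PySem.List.max?_eq_none_iff _ _).mp h4)) hne
  rw [pv_compute_sides_eq NB mnx mxx mny mxy h1 h2 h3 h4, pv_alt_eq region borders]
  have hgood : ∀ q : Int × Int, pvGood NB q = pvGood (pvShell region) q := by
    intro q
    have hcnt := List.countP_congr (l := pvSmallSquare)
      (p := fun s => decide ((q.1 + s.1, q.2 + s.2) ∈ NB))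
      (q := fun s => decide ((q.1 + s.1, q.2 + s.2) ∈ (pvShell region : List (Int × Int))))
      (fun s _ => by simp only [decide_eq_true_eq, hSh])
    simp only [pvGood, hcnt]
  rw [List.countP_congr
      (q := fun q => pvGood (pvShell region) q)
      (fun q _ => by rw [hgood])]
  have hsupp : ∀ p : Int × Int, (fun q => pvGood (pvShell region) q) p = true →
      (p ∈ (PySem.List.pyRange (mnx - 1) (mxx + 2) 1).flatMap (fun i =>
          (PySem.List.pyRange (mny - 1) (mxy + 2) 1).map (fun j => (i, j)))
        ↔ p ∈ (pvCand region : List (Int × Int))) := by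
    intro p hp
    simp only [pvGood, beq_iff_eq] at hp
    have hpos : 0 < pvSmallSquare.countP (fun s => decide ((p.1 + s.1, p.2 + s.2) ∈ (pvShell region : List (Int × Int)))) := by
      omega
    rw [List.countP_eq_length_filter, List.length_pos_iff] at hpos
    obtain ⟨s, hsf⟩ := List.exists_mem_of_ne_nil _ hpos
    rw [List.mem_filter, decide_eq_true_eq] at hsf
    obtain ⟨hs, hcell⟩ := hsf
    have hcellNB : (p.1 + s.1, p.2 + s.2) ∈ NB := (hSh _).mpr hcell
    have hb1 := PySem.List.min?_isMin h1 (p.1 + s.1) (List.mem_map_of_mem hcellNB)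
    have hb2 := PySem.List.max?_isMax h2 (p.1 + s.1) (List.mem_map_of_mem hcellNB)
    have hb3 := PySem.List.min?_isMin h3 (p.2 + s.2) (List.mem_map_of_mem hcellNB)
    have hb4 := PySem.List.max?_isMax h4 (p.2 + s.2) (List.mem_map_of_mem hcellNB)
    have hs1 : s.1 = 0 ∨ s.1 = 1 := by
      have := (pv_smallsquare_sub s hs).1; simp [pvZO] at this; exact this
    have hs2 : s.2 = 0 ∨ s.2 = 1 := by
      have := (pv_smallsquare_sub s hs).2; simp [pvZO] at this; exact this
    constructor
    · intro _
      unfold pvCand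
      rw [PySem.Set.mem_ofList]
      unfold pvCandL
      rw [List.mem_flatMap]
      refine ⟨(p.1 + s.1, p.2 + s.2), hcell, ?_⟩
      simp only [List.mem_flatMap, List.mem_map]
      refine ⟨s.1, ?_, s.2, ?_, ?_⟩
      · rcases hs1 with h | h <;> simp [pvZO, h]
      · rcases hs2 with h | h <;> simp [pvZO, h]
      · apply Prod.ext <;> simp
    · intro _
      rw [List.mem_flatMap]
      refine ⟨p.1, PySem.List.mem_pyRange_one.mpr (by omega), ?_⟩
      rw [List.mem_map]
      exact ⟨p.2, PySem.List.mem_pyRange_one.mpr (by omega), by simp⟩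
  have hnat := pv_countP_eq _ _ (fun q => pvGood (pvShell region) q)
    (pv_grid_nodup _ _ (PySem.List.nodup_pyRange_one _ _) (PySem.List.nodup_pyRange_one _ _))
    (PySem.Set.nodup_ofList _) hsupp
  exact_mod_cast hnat

theorem pv_main (region borders : List (Int × Int)) (hpre : region ≠ []) :
    extend_region region borders = extend_region_alt region borders := by
  rcases hmnx : PySem.List.min? (region.map (fun e => e.1)) (fun x => x) with _ | mnx
  · exact absurd (List.map_eq_nil_iff.mp ((PySem.List.min?_eq_none_iff _ _).mp hmnx)) hpre
  rcases hmxx : PySem.List.max? (region.map (fun e => e.1)) (fun x => x) with _ | mxx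
  · exact absurd (List.map_eq_nil_iff.mp ((PySem.List.max?_eq_none_iff _ _).mp hmxx)) hpre
  rcases hmny : PySem.List.min? (region.map (fun e => e.2)) (fun x => x) with _ | mny
  · exact absurd (List.map_eq_nil_iff.mp ((PySem.List.min?_eq_none_iff _ _).mp hmny)) hpre
  rcases hmxy : PySem.List.max? (region.map (fun e => e.2)) (fun x => x) with _ | mxy
  · exact absurd (List.map_eq_nil_iff.mp ((PySem.List.max?_eq_none_iff _ _).mp hmxy)) hpre
  unfold extend_region
  rw [hmnx, hmxx, hmny, hmxy]
  dsimp only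
  have hNR : ∀ q : Int × Int,
      q ∈ (PySem.List.pyRange mnx (mxx + 1) 1).foldl (fun acc i =>
            (PySem.List.pyRange mny (mxy + 1) 1).foldl (fun acc j =>
              if (i, j) ∈ region then
                pvSquares.foldl (fun acc s => acc ++ [(i * 3 + s.1, j * 3 + s.2)]) acc
              else acc) acc) ([] : List (Int × Int))
        ↔ q ∈ pvCellsL region := by
    intro q
    rw [pv_mem_nrloop]
    simp only [List.not_mem_nil, false_or]
    exact pv_NR_iff region mnx mxx mny mxy hmnx hmxx hmny hmxy q
  obtain ⟨c, hc, hc1⟩ := List.mem_map.mp (PySem.List.min?_mem hmnx)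
  have heNR : (3 * c.1 + 0, 3 * c.2 + 0) ∈ (PySem.List.pyRange mnx (mxx + 1) 1).foldl (fun acc i =>
            (PySem.List.pyRange mny (mxy + 1) 1).foldl (fun acc j =>
              if (i, j) ∈ region then
                pvSquares.foldl (fun acc s => acc ++ [(i * 3 + s.1, j * 3 + s.2)]) acc
              else acc) acc) ([] : List (Int × Int)) := by
    rw [hNR, pv_mem_cellsL]
    exact ⟨c, hc, 0, by simp [pvThree], 0, by simp [pvThree], rfl⟩
  have hwnot : ((3 * c.1 + 0) + (-1), (3 * c.2 + 0) + 0) ∉ (PySem.List.pyRange mnx (mxx + 1) 1).foldl (fun acc i =>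
            (PySem.List.pyRange mny (mxy + 1) 1).foldl (fun acc j =>
              if (i, j) ∈ region then
                pvSquares.foldl (fun acc s => acc ++ [(i * 3 + s.1, j * 3 + s.2)]) acc
              else acc) acc) ([] : List (Int × Int)) := by
    rw [hNR, pv_mem_cellsL]
    rintro ⟨c', hc', dx, hdx, dy, hdy, heq⟩
    have hfst : (3 * c.1 + 0) + (-1) = 3 * c'.1 + dx := congrArg Prod.fst heq
    have hdx' : dx = 0 ∨ dx = 1 ∨ dx = 2 := by simpa [pvThree] using hdx
    have hmin := PySem.List.min?_isMin hmnx c'.1 (List.mem_map_of_mem hc')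
    simp only at hmin
    omega
  refine pv_final region borders _ (pv_border_iff region _ hNR) ?_
  apply List.ne_nil_of_mem (a := ((3 * c.1 + 0) + (-1), (3 * c.2 + 0) + 0))
  rw [pv_mem_nbloop2]
  refine Or.inl ?_
  rw [pv_mem_nbloop1]
  exact Or.inr ⟨(3 * c.1 + 0, 3 * c.2 + 0), heNR, (-1, 0), by simp [pvNeighbours], rfl, hwnot⟩

-- ===== VERDICT =====
theorem extend_region_spec : Claim_equal_extend_region := by
  intro region borders _ hpre
  unfold Spec_extend_region
  exact pv_main region borders hpre
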